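-- pv_equiv track=rewrite | github.com/sirebellum/Resource-Prediction | predict.py | accuracy_dist
-- ===== SOURCE A (Python) =====
-- def accuracy_dist(actual, pred):
--
--     diff = [ abs(actual[x] - pred[x]) for x in range(0, len(actual)) ]
--     # count of errors below times
--     error = [0, 0, 0, 0]
--     for item in diff:
--         if item <= 10: # Less than 10 seconds
--             error[0] = error[0] + 1
--         if item <= 60: # Less than a minute
--             error[1] = error[1] + 1
--         if item <= 60*10: # Less than 10 minutes
--             error[2] = error[2] + 1
--         if item <= 60*60: # Less than an hour
--             error[3] = error[3] + 1
--
--     return error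
-- ===== SOURCE B (Python) =====
-- def accuracy_dist(actual, pred):
--     # Disjoint band histogram (band 4 = above an hour, ignored), then prefix sums.
--     buckets = [0, 0, 0, 0, 0]
--     for a, p in zip(actual, pred):
--         d = abs(a - p)
--         if d <= 10:
--             b = 0
--         elif d <= 60:
--             b = 1
--         elif d <= 600:
--             b = 2
--         elif d <= 3600:
--             b = 3
--         else:
--             b = 4
--         buckets[b] += 1
--     error = []
--     total = 0
--     for c in buckets[:4]:
--         total += c
--         error.append(total)
--     return error
-- ===== Notes on version B (the rewrite author's own statement) =====
-- stated objective: alternative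
-- what changed: Replaces A's four independent threshold comparisons per item with a disjoint band histogram (one bucket increment per item, items over an hour go to an ignored fifth bucket) followed by a prefix-sum pass over the buckets.
import Mathlib
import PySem

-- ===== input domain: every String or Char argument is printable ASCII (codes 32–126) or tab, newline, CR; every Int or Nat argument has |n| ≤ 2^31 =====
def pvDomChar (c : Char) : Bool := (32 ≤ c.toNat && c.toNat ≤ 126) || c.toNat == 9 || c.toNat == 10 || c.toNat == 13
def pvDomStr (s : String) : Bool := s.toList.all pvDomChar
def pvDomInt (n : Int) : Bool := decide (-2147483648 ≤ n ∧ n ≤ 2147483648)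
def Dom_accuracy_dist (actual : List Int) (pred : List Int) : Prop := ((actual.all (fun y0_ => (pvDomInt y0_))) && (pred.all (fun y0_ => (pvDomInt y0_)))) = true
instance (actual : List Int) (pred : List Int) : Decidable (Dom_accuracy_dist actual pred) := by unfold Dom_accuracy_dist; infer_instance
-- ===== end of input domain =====

-- B replaces A's four independent per-item comparisons with a disjoint band histogram
-- plus a prefix-sum pass (alternative decomposition, same O(n) cost); return-value equivalence only.

-- ===== PORT A =====
-- pyGetD is exact here: Pre_ guarantees every index the comprehension uses is in range.
def accuracy_dist (actual : List Int) (pred : List Int) : List Int :=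
  let diff := (PySem.List.pyRange 0 actual.length 1).map
    (fun x => |PySem.List.pyGetD actual x 0 - PySem.List.pyGetD pred x 0|)
  diff.foldl (fun error item =>
    let e0 := if item ≤ 10 then error.set 0 (error.getD 0 0 + 1) else error
    let e1 := if item ≤ 60 then e0.set 1 (e0.getD 1 0 + 1) else e0
    let e2 := if item ≤ 600 then e1.set 2 (e1.getD 2 0 + 1) else e1
    if item ≤ 3600 then e2.set 3 (e2.getD 3 0 + 1) else e2) [0, 0, 0, 0]

-- ===== PORT B =====
def pvBand (d : Int) : Nat :=
  if d ≤ 10 then 0 else if d ≤ 60 then 1 else if d ≤ 600 then 2 else if d ≤ 3600 then 3 else 4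

def accuracy_dist_alt (actual : List Int) (pred : List Int) : List Int :=
  let buckets := (actual.zip pred).foldl
    (fun (buckets : List Int) ap =>
      let b := pvBand |ap.1 - ap.2|
      buckets.set b (buckets.getD b 0 + 1)) [0, 0, 0, 0, 0]
  ((buckets.take 4).foldl (fun (s : List Int × Int) c => (s.1 ++ [s.2 + c], s.2 + c)) ([], 0)).1

-- ===== PRECONDITION & SPEC =====
-- A indexes pred by every position of actual, so it raises IndexError when pred is shorter.
def Pre_accuracy_dist (actual : List Int) (pred : List Int) : Prop :=
  actual.length ≤ pred.length
instance (actual : List Int) (pred : List Int) : Decidable (Pre_accuracy_dist actual pred) := by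
  unfold Pre_accuracy_dist; infer_instance

def pvWitness_accuracy_dist : List Int × List Int := ([5, 100, 4000], [0, 50, 100])

def Spec_accuracy_dist (actual : List Int) (pred : List Int) (out : List Int) : Prop := out = accuracy_dist_alt actual pred
instance (actual : List Int) (pred : List Int) (out : List Int) : Decidable (Spec_accuracy_dist actual pred out) := by unfold Spec_accuracy_dist; infer_instance

-- ===== CLAIM (what is proved, stated in full; the proofs are below) =====
def Claim_equal_accuracy_dist : Prop := ∀ (actual : List Int) (pred : List Int), Dom_accuracy_dist actual pred → Pre_accuracy_dist actual pred → Spec_accuracy_dist actual pred (accuracy_dist actual pred)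

-- ===== LEMMAS AND PROOFS =====

-- counts of diffs below a threshold / in a band
def pvCntLe (k : Int) (l : List Int) : Int := (l.countP (fun d => d ≤ k) : Int)
def pvCntBand (i : Nat) (l : List Int) : Int := (l.countP (fun d => pvBand d == i) : Int)

lemma pvCntLe_cons (k d : Int) (l : List Int) :
    pvCntLe k (d :: l) = pvCntLe k l + (if d ≤ k then 1 else 0) := by
  simp only [pvCntLe, List.countP_cons]
  split_ifs <;> simp_all

lemma pvCntBand_cons (i : Nat) (d : Int) (l : List Int) :
    pvCntBand i (d :: l) = pvCntBand i l + (if pvBand d = i then 1 else 0) := by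
  simp only [pvCntBand, List.countP_cons, beq_iff_eq]
  split_ifs <;> simp_all

-- A's comprehension equals the map over the zipped prefix (under Pre_)
lemma diff_eq_zip (actual pred : List Int) (h : actual.length ≤ pred.length) :
    (PySem.List.pyRange 0 actual.length 1).map
      (fun x => |PySem.List.pyGetD actual x 0 - PySem.List.pyGetD pred x 0|)
    = (actual.zip pred).map (fun ap => |ap.1 - ap.2|) := by
  apply List.ext_getElem
  · simp [PySem.List.length_pyRange_one]
    omega
  · intro i h1 h2
    have hi : i < actual.length := by
      simpa [PySem.List.length_pyRange_one] using h1
    have hip : i < pred.length := lt_of_lt_of_le hi h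
    simp [PySem.List.getElem_pyRange_one, List.getElem_zip,
      hi, hip]

-- one step of A's loop, evaluated
lemma stepA_eval (e0 e1 e2 e3 d : Int) :
    (let a := if d ≤ 10 then [e0, e1, e2, e3].set 0 ([e0, e1, e2, e3].getD 0 0 + 1) else [e0, e1, e2, e3]
     let b := if d ≤ 60 then a.set 1 (a.getD 1 0 + 1) else a
     let c := if d ≤ 600 then b.set 2 (b.getD 2 0 + 1) else b
     if d ≤ 3600 then c.set 3 (c.getD 3 0 + 1) else c)
    = [e0 + (if d ≤ 10 then 1 else 0), e1 + (if d ≤ 60 then 1 else 0),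
       e2 + (if d ≤ 600 then 1 else 0), e3 + (if d ≤ 3600 then 1 else 0)] := by
  split_ifs <;> simp_all [List.set, List.getD]

-- one step of B's histogram loop, evaluated
lemma stepB_eval (b0 b1 b2 b3 b4 d : Int) :
    [b0, b1, b2, b3, b4].set (pvBand d) ([b0, b1, b2, b3, b4].getD (pvBand d) 0 + 1)
    = [b0 + (if pvBand d = 0 then 1 else 0), b1 + (if pvBand d = 1 then 1 else 0),
       b2 + (if pvBand d = 2 then 1 else 0), b3 + (if pvBand d = 3 then 1 else 0),
       b4 + (if pvBand d = 4 then 1 else 0)] := by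
  unfold pvBand
  split_ifs <;> simp_all [List.set, List.getD]

-- closed form of A's fold
lemma foldA_closed (l : List Int) : ∀ (e0 e1 e2 e3 : Int),
    l.foldl (fun error item =>
      let a := if item ≤ 10 then error.set 0 (error.getD 0 0 + 1) else error
      let b := if item ≤ 60 then a.set 1 (a.getD 1 0 + 1) else a
      let c := if item ≤ 600 then b.set 2 (b.getD 2 0 + 1) else b
      if item ≤ 3600 then c.set 3 (c.getD 3 0 + 1) else c) [e0, e1, e2, e3]
    = [e0 + pvCntLe 10 l, e1 + pvCntLe 60 l, e2 + pvCntLe 600 l, e3 + pvCntLe 3600 l] := by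
  induction l with
  | nil => intro e0 e1 e2 e3; simp [pvCntLe]
  | cons d l ih =>
    intro e0 e1 e2 e3
    rw [List.foldl_cons, stepA_eval, ih]
    simp only [pvCntLe_cons, List.cons.injEq, and_true]
    split_ifs <;> omega

-- closed form of B's histogram fold
lemma foldB_closed (l : List Int) : ∀ (b0 b1 b2 b3 b4 : Int),
    l.foldl (fun (buckets : List Int) d =>
      buckets.set (pvBand d) (buckets.getD (pvBand d) 0 + 1)) [b0, b1, b2, b3, b4]
    = [b0 + pvCntBand 0 l, b1 + pvCntBand 1 l, b2 + pvCntBand 2 l,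
       b3 + pvCntBand 3 l, b4 + pvCntBand 4 l] := by
  induction l with
  | nil => intro b0 b1 b2 b3 b4; simp [pvCntBand]
  | cons d l ih =>
    intro b0 b1 b2 b3 b4
    rw [List.foldl_cons, stepB_eval, ih]
    simp only [pvCntBand_cons, List.cons.injEq, and_true]
    split_ifs <;> omega

-- thresholds are nested: cumulative counts are prefix sums of band counts
lemma cnt_bands (l : List Int) :
    pvCntLe 10 l = pvCntBand 0 l ∧
    pvCntLe 60 l = pvCntBand 0 l + pvCntBand 1 l ∧
    pvCntLe 600 l = pvCntBand 0 l + pvCntBand 1 l + pvCntBand 2 l ∧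
    pvCntLe 3600 l = pvCntBand 0 l + pvCntBand 1 l + pvCntBand 2 l + pvCntBand 3 l := by
  induction l with
  | nil => simp [pvCntLe, pvCntBand]
  | cons d l ih =>
    simp only [pvCntLe_cons, pvCntBand_cons]
    unfold pvBand
    split_ifs <;> simp_all <;> omega

-- B's fold over pairs equals the same fold over the diff list
lemma foldB_over_pairs (actual pred : List Int) :
    (actual.zip pred).foldl
      (fun (buckets : List Int) ap =>
        let b := pvBand |ap.1 - ap.2|
        buckets.set b (buckets.getD b 0 + 1)) [0, 0, 0, 0, 0]
    = ((actual.zip pred).map (fun ap => |ap.1 - ap.2|)).foldl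
        (fun (buckets : List Int) d =>
          buckets.set (pvBand d) (buckets.getD (pvBand d) 0 + 1)) [0, 0, 0, 0, 0] := by
  rw [List.foldl_map]

-- ===== VERDICT (by name: the statement is the Claim_ definition above) =====
theorem accuracy_dist_spec : Claim_equal_accuracy_dist := by
  intro actual pred _ hpre
  unfold Spec_accuracy_dist accuracy_dist accuracy_dist_alt
  rw [diff_eq_zip actual pred hpre, foldB_over_pairs]
  set l := (actual.zip pred).map (fun ap => |ap.1 - ap.2|) with hl
  rw [foldA_closed, foldB_closed]
  obtain ⟨h10, h60, h600, h3600⟩ := cnt_bands l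
  simp only [List.take, List.foldl_cons, List.foldl_nil, List.nil_append,
    List.cons_append, List.cons.injEq, and_true]
  refine ⟨by omega, by omega, by omega, by omega⟩
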